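-- pv_equiv track=rewrite | github.com/RajKKapadia/Upwork-Christopher-NutriHydro | document_gpt/helper/utils.py | get_chat_history
-- ===== SOURCE A (Python) =====
-- def get_chat_history(data: list) -> str:
--     chat_history = []
--     if len(data) == 2:
--         return chat_history
--     for i in range(1, len(data)-1, 2):
--         chat_history.append(
--             (
--                 data[i],
--                 data[i+1]
--             )
--         )
--     return chat_history
-- ===== SOURCE B (Python) =====
-- def get_chat_history(data: list) -> list:
--     return list(zip(data[1::2], data[2::2]))
-- ===== Notes on version B (the rewrite author's own statement) =====
-- stated objective: idiomatic
-- what changed: Replaces the indexed stride-2 loop (and the redundant len==2 guard) with a single zip over the two step-2 slices data[1::2] and data[2::2], zip's truncation reproducing the i+1 < len bound.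
import Mathlib
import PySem

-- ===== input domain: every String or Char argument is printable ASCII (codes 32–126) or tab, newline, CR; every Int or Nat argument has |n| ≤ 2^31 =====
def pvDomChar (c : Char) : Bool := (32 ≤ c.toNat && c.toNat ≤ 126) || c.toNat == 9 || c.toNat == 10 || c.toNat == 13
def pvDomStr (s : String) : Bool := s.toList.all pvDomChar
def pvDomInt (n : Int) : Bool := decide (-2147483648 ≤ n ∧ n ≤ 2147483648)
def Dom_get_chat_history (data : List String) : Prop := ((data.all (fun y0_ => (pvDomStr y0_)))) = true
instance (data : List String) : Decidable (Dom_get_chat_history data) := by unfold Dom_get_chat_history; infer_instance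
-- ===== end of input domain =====

-- B replaces A's indexed stride-2 loop (and redundant len==2 guard) by zipping the two step-2 slices data[1::2] and data[2::2].

-- ===== PORT A =====
def get_chat_history (data : List String) : List (String × String) :=
  if (data.length : Int) == 2 then []
  else
    (PySem.List.pyRange 1 ((data.length : Int) - 1) 2).foldl
      (fun acc i => acc ++ [(PySem.List.pyGetD data i "", PySem.List.pyGetD data (i + 1) "")]) []

-- ===== PORT B =====
def get_chat_history_alt (data : List String) : List (String × String) :=
  List.zip ((PySem.List.slice? data (some 1) none 2).getD [])
           ((PySem.List.slice? data (some 2) none 2).getD [])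

-- ===== PRECONDITION & SPEC =====
def Spec_get_chat_history (data : List String) (out : List (String × String)) : Prop := out = get_chat_history_alt data
instance (data : List String) (out : List (String × String)) : Decidable (Spec_get_chat_history data out) := by unfold Spec_get_chat_history; infer_instance

-- ===== CLAIM (what is proved, stated in full; the proofs are below) =====
def Claim_equal_get_chat_history : Prop := ∀ (data : List String), Dom_get_chat_history data → Spec_get_chat_history data (get_chat_history data)

-- ===== LEMMAS AND PROOFS =====

-- common normal form: the k-th pair is (data[2k+1], data[2k+2]), for k < (len-1)/2
def pvPairs (data : List String) : List (String × String) :=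
  (List.range ((data.length - 1) / 2)).map
    (fun k => ((data[2 * k + 1]?).getD "", (data[2 * k + 2]?).getD ""))

theorem zip_map_range {α β : Type} (a b : Nat) (f : Nat → α) (g : Nat → β) :
    List.zip (List.map f (List.range a)) (List.map g (List.range b)) =
      List.map (fun k => (f k, g k)) (List.range (min a b)) := by
  apply List.ext_getElem
  · simp
  · intro i h1 h2
    simp [List.getElem_zip]

theorem a_eq_pvPairs (data : List String) : get_chat_history data = pvPairs data := by
  unfold get_chat_history
  rw [PySem.List.pyRange_of_pos _ _ (by norm_num), PySem.List.foldl_append_singleton_eq_map]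
  simp only [List.map_map, List.nil_append, pvPairs]
  by_cases h2 : data.length = 2
  · rw [if_pos (by simp [h2])]
    have h0 : (data.length - 1) / 2 = 0 := by omega
    simp [h0]
  · rw [if_neg (by simp; exact_mod_cast h2)]
    have hcount : (if (1:Int) < (data.length:Int) - 1 then (((data.length:Int) - 1 - 1 + 2 - 1)/2).toNat else 0) = (data.length - 1)/2 := by
      split_ifs with h
      · omega
      · omega
    rw [hcount]
    apply List.map_congr_left
    intro k hk
    simp only [Function.comp]
    have e1 : (1 : Int) + 2 * (k : Int) = ((2*k+1 : Nat) : Int) := by push_cast; ring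
    rw [e1, PySem.List.pyGetD_natCast]
    have e2 : ((2*k+1 : Nat) : Int) + 1 = ((2*k+2 : Nat) : Int) := by push_cast; ring
    rw [e2, PySem.List.pyGetD_natCast]
    simp [List.getD_eq_getElem?_getD]

-- the two step-2 slices of B, in the same normal form
theorem sliceStep2 (data : List String) (a : Nat) :
    (PySem.List.slice? data (some (a : Int)) none 2).getD [] =
      (List.range ((data.length - a + 1) / 2)).map (fun k => (data[2 * k + a]?).getD "") := by
  simp only [PySem.List.slice?, PySem.List.sliceIndices]
  norm_num
  rw [if_neg (by omega : ¬ ((a:Int) < 0))]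
  by_cases h : data.length ≤ a
  · rw [if_neg (by omega : ¬ (min (a : Int) (data.length : Int) < (data.length : Int)))]
    have h0 : (data.length - a + 1) / 2 = 0 := by omega
    simp [h0]
  · rw [if_pos (by omega : min (a : Int) (data.length : Int) < (data.length : Int))]
    have hmin : min (a : Int) (data.length : Int) = (a : Int) := by omega
    rw [hmin]
    have hc : (((data.length : Int) - a + 2 - 1) / 2).toNat = (data.length - a + 1) / 2 := by omega
    rw [hc]
    rw [List.filterMap_congr (g := some ∘ fun k => (data[2 * k + a]?).getD "")]
    · exact congrFun List.filterMap_eq_map _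
    · intro k hk
      simp only [List.mem_range] at hk
      have hidx : (( (a:Int) + 2 * (k:Int)).toNat) = 2 * k + a := by omega
      rw [hidx]; simp only [Function.comp]
      have hlt : 2 * k + a < data.length := by omega
      simp [List.getElem?_eq_getElem hlt]

theorem b_eq_pvPairs (data : List String) : get_chat_history_alt data = pvPairs data := by
  unfold get_chat_history_alt
  have e1 := sliceStep2 data 1
  have e2 := sliceStep2 data 2
  norm_num at e1 e2
  rw [e1, e2, zip_map_range]
  have hmin : min ((data.length - 1 + 1) / 2) ((data.length - 2 + 1) / 2) = (data.length - 1) / 2 := by omega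
  rw [hmin]
  rfl

-- ===== VERDICT (by name: the statement is the Claim_ definition above) =====
theorem get_chat_history_spec : Claim_equal_get_chat_history := by
  intro data _
  unfold Spec_get_chat_history
  rw [a_eq_pvPairs, b_eq_pvPairs]
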